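-- pv_equiv track=rewrite | github.com/Teriks/pake | pake/entry_points/pake_command.py | _strip_single_arg_switches
-- ===== SOURCE A (Python) =====
-- def _strip_single_arg_switches(sys_args, switch_set):
--     continue_twice = False
--     for arg in sys_args:
--         if continue_twice:
--             continue_twice = False
--             continue
--         if arg in switch_set:
--             continue_twice = True
--             continue
--         yield arg
-- ===== SOURCE B (Python) =====
-- def _strip_single_arg_switches(sys_args, switch_set):
--     # Staged block strategy: materialize the args, then repeatedly scan
--     # forward to the next switch, emit the whole clean block before it as a
--     # slice, and jump over the switch and its paired argument.
--     args = list(sys_args)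
--     n = len(args)
--     i = 0
--     while i < n:
--         j = i
--         while j < n and args[j] not in switch_set:
--             j += 1
--         yield from args[i:j]
--         i = j + 2
-- ===== Notes on version B (the rewrite author's own statement) =====
-- stated objective: alternative
-- what changed: Replaces A's element-by-element loop with a continue_twice flag by a staged block algorithm: scan forward to the next switch, emit the whole preceding clean block as a slice, and jump the index past the switch and its paired argument.
import Mathlib
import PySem

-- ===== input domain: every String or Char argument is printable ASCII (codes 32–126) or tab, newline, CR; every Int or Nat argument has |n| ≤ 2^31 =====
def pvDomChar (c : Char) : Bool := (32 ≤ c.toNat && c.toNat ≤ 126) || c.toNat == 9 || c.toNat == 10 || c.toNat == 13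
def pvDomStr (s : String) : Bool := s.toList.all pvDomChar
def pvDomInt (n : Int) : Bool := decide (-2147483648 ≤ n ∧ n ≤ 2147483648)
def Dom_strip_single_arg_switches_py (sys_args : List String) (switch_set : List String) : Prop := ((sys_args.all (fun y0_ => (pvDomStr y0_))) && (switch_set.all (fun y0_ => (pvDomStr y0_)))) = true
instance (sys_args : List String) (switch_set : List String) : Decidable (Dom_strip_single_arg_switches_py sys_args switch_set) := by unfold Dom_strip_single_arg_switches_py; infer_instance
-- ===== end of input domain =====

-- B replaces A's continue_twice flag loop by a staged block algorithm: find the next switch, emit the clean block before it as a slice, jump past the switch and its paired argument (alternative decomposition; same cost).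
-- ===== PORT A =====
-- A: element-by-element loop carrying a continue_twice flag
def pvAgo (switch_set : List String) : List String → Bool → List String
  | [], _ => []
  | arg :: rest, continue_twice =>
    if continue_twice then pvAgo switch_set rest false
    else if switch_set.contains arg then pvAgo switch_set rest true
    else arg :: pvAgo switch_set rest false

def strip_single_arg_switches_py (sys_args : List String) (switch_set : List String) : List String :=
  pvAgo switch_set sys_args false

-- ===== PORT B =====
-- B: scan to the next switch (inner while = findIdx?), emit the slice before it, jump past switch+argument
def pvBgo (switch_set : List String) (args : List String) : List String :=
  match _h : args.findIdx? (fun a => switch_set.contains a) with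
  | none => args
  | some j =>
    args.take j ++ pvBgo switch_set (args.drop (j + 2))
termination_by args.length
decreasing_by
  have hlt : j < args.length := ((List.findIdx?_eq_some_iff_findIdx_eq).1 _h).1
  simp [List.length_drop]; omega

def strip_single_arg_switches_py_alt (sys_args : List String) (switch_set : List String) : List String :=
  pvBgo switch_set sys_args

-- ===== PRECONDITION & SPEC =====
def Spec_strip_single_arg_switches_py (sys_args : List String) (switch_set : List String) (out : List String) : Prop := out = strip_single_arg_switches_py_alt sys_args switch_set
instance (sys_args : List String) (switch_set : List String) (out : List String) : Decidable (Spec_strip_single_arg_switches_py sys_args switch_set out) := by unfold Spec_strip_single_arg_switches_py; infer_instance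

-- ===== CLAIM (what is proved, stated in full; the proofs are below) =====
def Claim_equal_strip_single_arg_switches_py : Prop := ∀ (sys_args : List String) (switch_set : List String), Dom_strip_single_arg_switches_py sys_args switch_set → Spec_strip_single_arg_switches_py sys_args switch_set (strip_single_arg_switches_py sys_args switch_set)

-- ===== LEMMAS AND PROOFS =====

-- ===== VERDICT (by name: the statement is the Claim_ definition above) =====

theorem pvBgo_eq (sw : List String) (args : List String) :
    pvBgo sw args = match args.findIdx? (fun a => sw.contains a) with
      | none => args
      | some j => args.take j ++ pvBgo sw (args.drop (j + 2)) := by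
  rw [pvBgo]; split <;> rename_i heq <;> rw [heq]

theorem pvBgo_cons_match (sw : List String) (a : String) (r : List String)
    (h : a ∈ sw) : pvBgo sw (a :: r) = pvBgo sw r.tail := by
  rw [pvBgo_eq]
  simp [List.findIdx?_cons, h, List.drop_one]

theorem pvBgo_cons_nomatch (sw : List String) (a : String) (r : List String)
    (h : a ∉ sw) : pvBgo sw (a :: r) = a :: pvBgo sw r := by
  rw [pvBgo_eq, pvBgo_eq sw r]
  simp only [List.findIdx?_cons, List.contains_eq_mem, h, decide_false, Bool.false_eq_true,
    if_false]
  cases hr : r.findIdx? (fun a => decide (a ∈ sw)) with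
  | none => simp
  | some j => simp [List.take_succ_cons, List.drop_succ_cons]

theorem pv_go_eq (sw : List String) : ∀ args : List String,
    pvAgo sw args false = pvBgo sw args ∧ pvAgo sw args true = pvBgo sw args.tail := by
  intro args
  induction args with
  | nil => constructor <;> rw [pvAgo, pvBgo] <;> simp
  | cons a r ih =>
    constructor
    · by_cases h : a ∈ sw
      · rw [pvAgo, pvBgo_cons_match sw a r h]
        simp [h, ih.2]
      · rw [pvAgo, pvBgo_cons_nomatch sw a r h]
        simp [h, ih.1]
    · rw [pvAgo]; simp [ih.1]

theorem strip_single_arg_switches_py_spec : Claim_equal_strip_single_arg_switches_py := by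
  intro sys_args switch_set _
  unfold Spec_strip_single_arg_switches_py strip_single_arg_switches_py strip_single_arg_switches_py_alt
  exact (pv_go_eq switch_set sys_args).1
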